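-- pv_equiv track=rewrite | github.com/cjcamilo1203-stack/metarobots-jurados | jurados/services_torneo.py | get_round_name
-- ===== SOURCE A (Python) =====
-- from typing import List, Optional, Tuple
--
-- def get_round_name(total_participants: int, round_index: int) -> str:
--     rounds: List[str] = []
--     participants = total_participants
--     while participants > 2:
--         if participants <= 32 and participants > 16:
--             rounds.append('Dieciseisavos')
--         elif participants <= 16 and participants > 8:
--             rounds.append('Octavos')
--         elif participants <= 8 and participants > 4:
--             rounds.append('Cuartos')
--         elif participants <= 4 and participants > 2:
--             rounds.append('Semifinales')
--         else:
--             rounds.append(f'Ronda {len(rounds) + 1}')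
--         participants = (participants + 1) // 2
--     return rounds[round_index] if round_index < len(rounds) else f'Ronda {round_index + 1}'
-- ===== SOURCE B (Python) =====
-- def get_round_name(total_participants: int, round_index: int) -> str:
--     # Count the rounds without materialising the list.
--     n = 0
--     p = total_participants
--     while p > 2:
--         n += 1
--         p = (p + 1) // 2
--     idx = round_index if round_index >= 0 else round_index + n
--     if idx < 0 or idx >= n:
--         return f'Ronda {round_index + 1}'
--     # Walk the bracket down to the requested round and name it directly.
--     p = total_participants
--     i = 0
--     while i < idx:
--         p = (p + 1) // 2
--         i += 1
--     if 16 < p <= 32: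
--         return 'Dieciseisavos'
--     if 8 < p <= 16:
--         return 'Octavos'
--     if 4 < p <= 8:
--         return 'Cuartos'
--     if 2 < p <= 4:
--         return 'Semifinales'
--     return f'Ronda {idx + 1}'
-- ===== Notes on version B (the rewrite author's own statement) =====
-- stated objective: alternative
-- what changed: B never materialises the rounds list: it counts the halving steps, normalises a negative index against that count, walks the bracket straight to the selected round and names it directly, instead of A's build-whole-list-then-index.
import Mathlib
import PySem

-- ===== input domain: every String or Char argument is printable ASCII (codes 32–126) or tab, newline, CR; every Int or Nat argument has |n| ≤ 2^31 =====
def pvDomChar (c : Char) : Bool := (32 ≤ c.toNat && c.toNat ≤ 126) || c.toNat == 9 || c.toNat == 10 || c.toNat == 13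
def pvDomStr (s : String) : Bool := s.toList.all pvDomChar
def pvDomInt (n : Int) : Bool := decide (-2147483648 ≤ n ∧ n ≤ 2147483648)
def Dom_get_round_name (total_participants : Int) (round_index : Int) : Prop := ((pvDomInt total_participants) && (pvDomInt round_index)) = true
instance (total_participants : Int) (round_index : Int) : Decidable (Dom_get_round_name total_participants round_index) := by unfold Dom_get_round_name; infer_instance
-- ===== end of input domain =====

-- B replaces A's build-the-whole-rounds-list-then-index with a counting pass plus a direct
-- walk to the selected round (alternative decomposition; same asymptotic cost).


-- ===== PORT A =====
-- A's while-loop: append a round name while participants > 2, halving upward each step.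
def pvBuildRounds (p : Int) (rounds : List String) : List String :=
  if h : p > 2 then
    pvBuildRounds (PySem.Int.floordiv (p + 1) 2)
      (rounds ++ [if p ≤ 32 ∧ p > 16 then "Dieciseisavos"
        else if p ≤ 16 ∧ p > 8 then "Octavos"
        else if p ≤ 8 ∧ p > 4 then "Cuartos"
        else if p ≤ 4 ∧ p > 2 then "Semifinales"
        else "Ronda " ++ PySem.Int.toStr ((rounds.length : Int) + 1)])
  else rounds
termination_by p.toNat
decreasing_by
  have : PySem.Int.floordiv (p + 1) 2 = (p + 1) / 2 :=
    PySem.Int.floordiv_eq_ediv_of_pos (by omega)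
  omega

def get_round_name (total_participants : Int) (round_index : Int) : String :=
  let rounds := pvBuildRounds total_participants []
  if round_index < (rounds.length : Int) then
    (PySem.List.pyGet? rounds round_index).getD ""   -- .getD "" totalizes; Pre_ excludes the IndexError inputs
  else "Ronda " ++ PySem.Int.toStr (round_index + 1)

-- ===== PORT B =====
-- Source B's first loop: count the rounds.
def pvCountRounds (p : Int) (n : Int) : Int :=
  if h : p > 2 then pvCountRounds (PySem.Int.floordiv (p + 1) 2) (n + 1) else n
termination_by p.toNat
decreasing_by
  have : PySem.Int.floordiv (p + 1) 2 = (p + 1) / 2 :=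
    PySem.Int.floordiv_eq_ediv_of_pos (by omega)
  omega

-- Source B's second loop: halve participants until i reaches idx.
def pvWalk (p : Int) (i : Int) (idx : Int) : Int :=
  if h : i < idx then pvWalk (PySem.Int.floordiv (p + 1) 2) (i + 1) idx else p
termination_by (idx - i).toNat
decreasing_by omega

def get_round_name_alt (total_participants : Int) (round_index : Int) : String :=
  let n := pvCountRounds total_participants 0
  let idx := if round_index ≥ 0 then round_index else round_index + n
  if idx < 0 ∨ idx ≥ n then "Ronda " ++ PySem.Int.toStr (round_index + 1)
  else
    let p := pvWalk total_participants 0 idx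
    if 16 < p ∧ p ≤ 32 then "Dieciseisavos"
    else if 8 < p ∧ p ≤ 16 then "Octavos"
    else if 4 < p ∧ p ≤ 8 then "Cuartos"
    else if 2 < p ∧ p ≤ 4 then "Semifinales"
    else "Ronda " ++ PySem.Int.toStr (idx + 1)

-- ===== PRECONDITION & SPEC =====
-- Pre_ excludes exactly the inputs where A raises IndexError: a negative round_index below
-- -(number of rounds), i.e. total_participants ≤ 2^(-round_index) (the 'min … 32' cap only
-- keeps the power small; on the domain |total_participants| ≤ 2^31 it excludes nothing extra).
def Pre_get_round_name (total_participants : Int) (round_index : Int) : Prop :=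
  0 ≤ round_index ∨
    (-round_index < 32 ∧ (2 : Int) ^ (min (-round_index).toNat 32) < total_participants)
instance (total_participants : Int) (round_index : Int) : Decidable (Pre_get_round_name total_participants round_index) := by unfold Pre_get_round_name; infer_instance
def pvWitness_get_round_name : Int × Int := (8, -1)

def Spec_get_round_name (total_participants : Int) (round_index : Int) (out : String) : Prop := out = get_round_name_alt total_participants round_index
instance (total_participants : Int) (round_index : Int) (out : String) : Decidable (Spec_get_round_name total_participants round_index out) := by unfold Spec_get_round_name; infer_instance

-- ===== CLAIM (what is proved, stated in full; the proofs are below) =====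
def Claim_equal_get_round_name : Prop := ∀ (total_participants : Int) (round_index : Int), Dom_get_round_name total_participants round_index → Pre_get_round_name total_participants round_index → Spec_get_round_name total_participants round_index (get_round_name total_participants round_index)
-- ===== LEMMAS AND PROOFS =====

-- one halving step, the number of rounds, the round applied j times, and the common name table
def pvHalve (p : Int) : Int := PySem.Int.floordiv (p + 1) 2

def pvCnt (p : Int) : Nat :=
  if h : p > 2 then pvCnt (pvHalve p) + 1 else 0
termination_by p.toNat
decreasing_by
  have : pvHalve p = (p + 1) / 2 := PySem.Int.floordiv_eq_ediv_of_pos (by omega)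
  omega

def pvIter : Nat → Int → Int
  | 0, p => p
  | k + 1, p => pvIter k (pvHalve p)

def pvName (p : Int) (i : Int) : String :=
  if 16 < p ∧ p ≤ 32 then "Dieciseisavos"
  else if 8 < p ∧ p ≤ 16 then "Octavos"
  else if 4 < p ∧ p ≤ 8 then "Cuartos"
  else if 2 < p ∧ p ≤ 4 then "Semifinales"
  else "Ronda " ++ PySem.Int.toStr (i + 1)

lemma pvCountRounds_eq (p n : Int) : pvCountRounds p n = n + (pvCnt p : Int) := by
  induction p, n using pvCountRounds.induct with
  | case1 p n h ih =>
      rw [pvCountRounds, pvCnt, dif_pos h, dif_pos h, ih]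
      push_cast [pvHalve]
      ring
  | case2 p n h =>
      rw [pvCountRounds, pvCnt, dif_neg h, dif_neg h]
      simp

lemma pvWalk_eq (p i idx : Int) : pvWalk p i idx = pvIter (idx - i).toNat p := by
  induction p, i using pvWalk.induct idx with
  | case1 p i h ih =>
      rw [pvWalk, dif_pos h, ih]
      have hk : (idx - i).toNat = (idx - (i + 1)).toNat + 1 := by omega
      rw [hk]
      rfl
  | case2 p i h =>
      rw [pvWalk, dif_neg h]
      have hk : (idx - i).toNat = 0 := by omega
      rw [hk]
      rfl

lemma pvBuildRounds_eq (p : Int) : ∀ rounds : List String,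
    pvBuildRounds p rounds =
      rounds ++ (List.range (pvCnt p)).map
        (fun j => pvName (pvIter j p) ((rounds.length : Int) + j)) := by
  induction p using pvCnt.induct with
  | case1 p h ih =>
      intro rounds
      rw [pvBuildRounds, dif_pos h, pvCnt, dif_pos h,
        show PySem.Int.floordiv (p + 1) 2 = pvHalve p from rfl, ih, List.range_succ_eq_map]
      simp only [List.map_cons, List.map_map, List.append_assoc, List.singleton_append,
        List.length_append, List.length_singleton]
      congr 1
      congr 1
      · -- the appended head equals pvName p (rounds.length)
        simp only [pvIter, Nat.cast_zero, add_zero]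
        unfold pvName
        split_ifs <;> first | rfl | omega
      · -- the tails agree
        refine List.map_congr_left (fun j hj => ?_)
        simp only [Function.comp]
        have h1 : pvIter (j + 1) p = pvIter j (pvHalve p) := rfl
        rw [h1]
        congr 1
        push_cast
        ring
  | case2 p h =>
      intro rounds
      rw [pvBuildRounds, dif_neg h, pvCnt, dif_neg h]
      simp

lemma pvCnt_ge (k : Nat) (p : Int) (h : (2 : Int) ^ k < p) : k ≤ pvCnt p := by
  induction k generalizing p with
  | zero => omega
  | succ k ih =>
      have h2 : p > 2 := by
        have : (2 : Int) ≤ 2 ^ (k + 1) := by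
          calc (2 : Int) = 2 ^ 1 := by norm_num
          _ ≤ 2 ^ (k + 1) := by
            apply pow_le_pow_right₀ <;> omega
        omega
      rw [pvCnt]
      simp only [h2, dif_pos]
      have hh : (2 : Int) ^ k < pvHalve p := by
        have he : pvHalve p = (p + 1) / 2 := PySem.Int.floordiv_eq_ediv_of_pos (by omega)
        have hp : (2 : Int) * 2 ^ k < p := by
          have : (2 : Int) ^ (k + 1) = 2 * 2 ^ k := by ring
          omega
        omega
      have := ih (pvHalve p) hh
      omega

-- element j of A's list
lemma pvRounds_getElem? (total : Int) (j : Nat) (hj : j < pvCnt total) :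
    (pvBuildRounds total [])[j]? = some (pvName (pvIter j total) (j : Int)) := by
  have h := pvBuildRounds_eq total []
  simp only [List.nil_append, List.length_nil, Int.natCast_zero] at h
  rw [h, List.getElem?_map, List.getElem?_range hj]
  simp

lemma pvLen_rounds (total : Int) : (pvBuildRounds total []).length = pvCnt total := by
  rw [pvBuildRounds_eq]; simp

-- ===== VERDICT (by name: the statement is the Claim_ definition above) =====
theorem get_round_name_spec : Claim_equal_get_round_name := by
  unfold Claim_equal_get_round_name
  intro total ri _hdom hpre
  unfold Spec_get_round_name get_round_name get_round_name_alt
  simp only []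
  rw [pvCountRounds_eq]
  simp only [Int.zero_add]
  set N : Nat := pvCnt total with hN
  have hlen : (pvBuildRounds total []).length = N := pvLen_rounds total
  by_cases hri : 0 ≤ ri
  · -- nonnegative index
    by_cases hlt : ri < (N : Int)
    · -- in range: both return the name of round ri
      have hidx : ¬ ((if ri ≥ 0 then ri else ri + (N : Int)) < 0 ∨
          (if ri ≥ 0 then ri else ri + (N : Int)) ≥ (N : Int)) := by
        simp [hri]; omega
      rw [if_pos (by rw [hlen]; exact hlt), if_neg hidx]
      have hcast : ri = ((ri.toNat : Nat) : Int) := by omega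
      have hjlt : ri.toNat < N := by omega
      rw [hcast, PySem.List.pyGet?_natCast, pvRounds_getElem? total ri.toNat (by omega),
        Option.getD_some]
      rw [if_pos (by omega : ((ri.toNat : Int)) ≥ 0)]
      rw [pvWalk_eq]
      have : ((ri.toNat : Int) - 0).toNat = ri.toNat := by omega
      rw [this]
      unfold pvName
      rfl
    · -- past the end: both fall back to "Ronda (ri+1)"
      rw [if_neg (by rw [hlen]; exact hlt)]
      have hidx : ((if ri ≥ 0 then ri else ri + (N : Int)) < 0 ∨
          (if ri ≥ 0 then ri else ri + (N : Int)) ≥ (N : Int)) := by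
        simp [hri]; omega
      rw [if_pos hidx]
  · -- negative index: Pre_ guarantees it reaches into the list from the end
    have hk := hpre.resolve_left hri
    set k : Nat := (-ri).toNat with hkdef
    have hk32 : min k 32 = k := by omega
    rw [hk32] at hk
    have hkN : k ≤ N := pvCnt_ge k total hk.2
    have hk1 : 1 ≤ k := by omega
    have hri_eq : ri = -(k : Int) := by omega
    have hlt : ri < ((pvBuildRounds total []).length : Int) := by rw [hlen]; omega
    rw [if_pos hlt, hri_eq]
    rw [PySem.List.pyGet?_neg_natCast _ k (by omega) (by omega)]
    rw [show (pvBuildRounds total []).length - k = N - k from by omega,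
      pvRounds_getElem? total (N - k) (by omega), Option.getD_some]
    have hidx : ¬ ((if -(k : Int) ≥ 0 then -(k : Int) else -(k : Int) + (N : Int)) < 0 ∨
        (if -(k : Int) ≥ 0 then -(k : Int) else -(k : Int) + (N : Int)) ≥ (N : Int)) := by
      rw [if_neg (by omega)]
      omega
    rw [if_neg hidx, if_neg (by omega : ¬ -(k : Int) ≥ 0)]
    rw [pvWalk_eq]
    have h1 : ((-(k : Int) + (N : Int)) - 0).toNat = N - k := by omega
    have h2 : (-(k : Int) + (N : Int)) = ((N - k : Nat) : Int) := by omega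
    rw [h1, h2]
    unfold pvName
    rfl
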